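-- pv_equiv track=rewrite | github.com/martin-ejdestig/rayni | tools/style_check.py | string_index_to_line_and_column
-- ===== SOURCE A (Python) =====
-- def string_index_to_line_and_column(string, index):
--     line = 1
--     column = 1
--
--     for line_length in [len(line) for line in string.splitlines(True)]:
--         if index < line_length:
--             column = index + 1
--             break
--         index -= line_length
--         line += 1
--
--     return (line, column)
-- ===== SOURCE B (Python) =====
-- def string_index_to_line_and_column(string, index):
--     # Prefix-sum table of cumulative line lengths + binary search,
--     # instead of A's linear subtract-and-scan.
--     prefix = []
--     total = 0
--     for line in string.splitlines(True):
--         total += len(line)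
--         prefix.append(total)
--     if not prefix or index >= total:
--         return (len(prefix) + 1, 1)
--     lo, hi = 0, len(prefix)
--     while lo < hi:  # bisect_right by hand
--         mid = (lo + hi) // 2
--         if prefix[mid] <= index:
--             lo = mid + 1
--         else:
--             hi = mid
--     prev = prefix[lo - 1] if lo else 0
--     return (lo + 1, index - prev + 1)
-- ===== Notes on version B (the rewrite author's own statement) =====
-- stated objective: alternative
-- what changed: B builds a prefix-sum table of cumulative line lengths once and locates the line with a hand-written bisect_right binary search (column = index minus previous cumulative sum + 1), replacing A's linear subtract-and-scan over the line lengths.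
import Mathlib
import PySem

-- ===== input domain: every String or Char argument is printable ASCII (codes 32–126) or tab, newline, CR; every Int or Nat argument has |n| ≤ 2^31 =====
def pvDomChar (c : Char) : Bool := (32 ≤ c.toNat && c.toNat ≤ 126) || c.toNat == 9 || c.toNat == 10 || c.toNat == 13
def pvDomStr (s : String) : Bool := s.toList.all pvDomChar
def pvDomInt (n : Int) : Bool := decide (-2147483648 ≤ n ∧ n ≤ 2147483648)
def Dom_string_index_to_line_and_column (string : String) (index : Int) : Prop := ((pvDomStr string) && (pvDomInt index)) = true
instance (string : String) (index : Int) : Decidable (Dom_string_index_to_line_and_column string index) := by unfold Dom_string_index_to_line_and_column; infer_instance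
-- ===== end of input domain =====

-- B replaces A's linear subtract-and-scan by a pfx-sum table + binary search (same value everywhere).

-- Hand port of str.splitlines(keepends=True): exact on the Dom alphabet, where the only
-- line boundaries are '\n', '\r' and '\r\n' (the other Unicode boundaries cannot occur).
def pvSplitlinesKeep (cs : List Char) (cur : List Char) : List (List Char) :=
  match cs with
  | [] => if cur = [] then [] else [cur.reverse]
  | '\r' :: '\n' :: rest => (cur.reverse ++ ['\r', '\n']) :: pvSplitlinesKeep rest []
  | '\n' :: rest => (cur.reverse ++ ['\n']) :: pvSplitlinesKeep rest []
  | '\r' :: rest => (cur.reverse ++ ['\r']) :: pvSplitlinesKeep rest []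
  | c :: rest => pvSplitlinesKeep rest (c :: cur)

-- ===== PORT A =====
-- A's for-loop over the list of line lengths, with break.
def pvGoA : List Int → Int → Int → Int × Int
  | [], line, _ => (line, 1)
  | l :: ls, line, index =>
    if index < l then (line, index + 1) else pvGoA ls (line + 1) (index - l)

def string_index_to_line_and_column (string : String) (index : Int) : Int × Int :=
  pvGoA ((pvSplitlinesKeep string.toList []).map (fun l => (l.length : Int))) 1 index

-- ===== PORT B =====
-- Source B's first loop: running total, appending each cumulative sum; returns (pfx, total).
def pvBuildPrefix : List Int → Int → List Int × Int
  | [], total => ([], total)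
  | n :: ls, total =>
    let r := pvBuildPrefix ls (total + n)
    ((total + n) :: r.1, r.2)

-- Source B's hand-written bisect_right while-loop. pfx[mid] is in range whenever the loop
-- runs (0 ≤ lo ≤ mid < hi ≤ len), so getD's default is never used.
def pvBisect (pfx : List Int) (index : Int) (lo hi : Nat) : Nat :=
  if lo < hi then
    let mid := (lo + hi) / 2
    if pfx.getD mid 0 ≤ index then pvBisect pfx index (mid + 1) hi
    else pvBisect pfx index lo mid
  else lo
termination_by hi - lo
decreasing_by all_goals omega

def pvAltCore (lens : List Int) (index : Int) : Int × Int :=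
  let p := pvBuildPrefix lens 0
  if p.1 = [] ∨ p.2 ≤ index then ((p.1.length : Int) + 1, 1)
  else
    let lo := pvBisect p.1 index 0 p.1.length
    let prev := if lo = 0 then 0 else p.1.getD (lo - 1) 0
    ((lo : Int) + 1, index - prev + 1)

def string_index_to_line_and_column_alt (string : String) (index : Int) : Int × Int :=
  pvAltCore ((pvSplitlinesKeep string.toList []).map (fun l => (l.length : Int))) index

-- ===== PRECONDITION & SPEC =====
def Spec_string_index_to_line_and_column (string : String) (index : Int) (out : Int × Int) : Prop := out = string_index_to_line_and_column_alt string index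
instance (string : String) (index : Int) (out : Int × Int) : Decidable (Spec_string_index_to_line_and_column string index out) := by unfold Spec_string_index_to_line_and_column; infer_instance

-- ===== CLAIM (what is proved, stated in full; the proofs are below) =====
def Claim_equal_string_index_to_line_and_column : Prop := ∀ (string : String) (index : Int), Dom_string_index_to_line_and_column string index → Spec_string_index_to_line_and_column string index (string_index_to_line_and_column string index)

-- ===== LEMMAS AND PROOFS =====

-- number of leading elements ≤ x (what bisect_right computes on a sorted list)
def pvCnt (xs : List Int) (x : Int) : Nat := (xs.takeWhile (fun a => decide (a ≤ x))).length

lemma pvGoA_shift (ls : List Int) (x line : Int) :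
    pvGoA ls line x = ((pvGoA ls 1 x).1 + (line - 1), (pvGoA ls 1 x).2) := by
  induction ls generalizing x line with
  | nil => simp [pvGoA]
  | cons l ls ih =>
    simp only [pvGoA]
    by_cases h : x < l
    · simp [h]
    · simp only [h, if_false]
      rw [ih (x - l) (line + 1), ih (x - l) (1 + 1)]
      simp only [Prod.mk.injEq, and_true]
      ring

lemma pvBuildPrefix_snd (ls : List Int) (t : Int) :
    (pvBuildPrefix ls t).2 = t + ls.sum := by
  induction ls generalizing t with
  | nil => simp [pvBuildPrefix]
  | cons n ls ih => simp [pvBuildPrefix, ih]; ring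

lemma pvBuildPrefix_fst_shift (ls : List Int) (t : Int) :
    (pvBuildPrefix ls t).1 = (pvBuildPrefix ls 0).1.map (· + t) := by
  induction ls generalizing t with
  | nil => simp [pvBuildPrefix]
  | cons n ls ih =>
    simp only [pvBuildPrefix, List.map_cons]
    rw [ih (t + n), ih (0 + n), List.map_map]
    congr 1
    · ring
    · exact List.map_congr_left (fun a _ => by simp; ring)

lemma pvBuildPrefix_length (ls : List Int) (t : Int) :
    (pvBuildPrefix ls t).1.length = ls.length := by
  induction ls generalizing t with
  | nil => simp [pvBuildPrefix]
  | cons n ls ih => simp [pvBuildPrefix, ih]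

lemma pvBuildPrefix_lb (ls : List Int) (t : Int) (h : ∀ n ∈ ls, 0 ≤ n) :
    ∀ y ∈ (pvBuildPrefix ls t).1, t ≤ y := by
  induction ls generalizing t with
  | nil => simp [pvBuildPrefix]
  | cons n ls ih =>
    have hn : 0 ≤ n := h n (by simp)
    have hls : ∀ m ∈ ls, 0 ≤ m := fun m hm => h m (by simp [hm])
    intro y hy
    simp only [pvBuildPrefix, List.mem_cons] at hy
    rcases hy with rfl | hy
    · omega
    · have := ih (t + n) hls y hy; omega

lemma pvBuildPrefix_sorted (ls : List Int) (t : Int) (h : ∀ n ∈ ls, 0 ≤ n) :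
    (pvBuildPrefix ls t).1.Pairwise (· ≤ ·) := by
  induction ls generalizing t with
  | nil => simp [pvBuildPrefix]
  | cons n ls ih =>
    have hn : 0 ≤ n := h n (by simp)
    have hls : ∀ m ∈ ls, 0 ≤ m := fun m hm => h m (by simp [hm])
    simp only [pvBuildPrefix, List.pairwise_cons]
    exact ⟨fun y hy => pvBuildPrefix_lb ls (t + n) hls y hy, ih (t + n) hls⟩

lemma pvCnt_le (xs : List Int) (x : Int) : pvCnt xs x ≤ xs.length := by
  exact List.IsPrefix.length_le (List.takeWhile_prefix _)

lemma pvCnt_iff (xs : List Int) (x : Int) (hs : xs.Pairwise (· ≤ ·))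
    (j : Nat) (hj : j < xs.length) : j < pvCnt xs x ↔ xs[j] ≤ x := by
  induction xs generalizing j with
  | nil => simp at hj
  | cons a xs ih =>
    rw [List.pairwise_cons] at hs
    by_cases ha : a ≤ x
    · have : pvCnt (a :: xs) x = pvCnt xs x + 1 := by
        simp [pvCnt, ha]
      rw [this]
      cases j with
      | zero => simpa using ha
      | succ j =>
        simp only [List.getElem_cons_succ]
        rw [Nat.succ_lt_succ_iff]
        exact ih hs.2 j (by simpa using hj)
    · have : pvCnt (a :: xs) x = 0 := by simp [pvCnt, ha]
      rw [this]
      cases j with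
      | zero => simpa using ha
      | succ j =>
        simp only [List.getElem_cons_succ]
        constructor
        · omega
        · intro hc
          exact absurd (le_trans (hs.1 _ (List.getElem_mem _)) hc) ha

lemma pvBisect_eq_cnt (xs : List Int) (x : Int) (hs : xs.Pairwise (· ≤ ·)) :
    ∀ fuel lo hi, hi - lo ≤ fuel → hi ≤ xs.length → lo ≤ pvCnt xs x → pvCnt xs x ≤ hi →
      pvBisect xs x lo hi = pvCnt xs x := by
  intro fuel
  induction fuel with
  | zero =>
    intro lo hi hf hlen hlo hhi
    rw [pvBisect]
    have : ¬ lo < hi := by omega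
    simp only [this, if_false]
    omega
  | succ fuel ih =>
    intro lo hi hf hlen hlo hhi
    rw [pvBisect]
    by_cases hlh : lo < hi
    · simp only [hlh, if_true]
      have hmid : (lo + hi) / 2 < xs.length := by omega
      rw [List.getD_eq_getElem _ _ hmid]
      by_cases hc : xs[(lo + hi) / 2] ≤ x
      · simp only [hc, if_true]
        have : (lo + hi) / 2 < pvCnt xs x := (pvCnt_iff xs x hs _ hmid).mpr hc
        exact ih ((lo + hi) / 2 + 1) hi (by omega) hlen (by omega) hhi
      · simp only [hc, if_false]
        have : ¬ ((lo + hi) / 2 < pvCnt xs x) := fun hlt => hc ((pvCnt_iff xs x hs _ hmid).mp hlt)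
        exact ih lo ((lo + hi) / 2) (by omega) (by omega) hlo (by omega)
    · simp only [hlh, if_false]
      omega

lemma pvGetD_map_add (P : List Int) (l : Int) (k : Nat) (hk : k < P.length) :
    (P.map (· + l)).getD k 0 = P.getD k 0 + l := by
  rw [List.getD_eq_getElem _ _ (by simpa using hk), List.getD_eq_getElem _ _ hk]
  simp

lemma pvAltCore_cons (l : Int) (ls : List Int) (x : Int) (h0 : 0 ≤ l)
    (hls : ∀ n ∈ ls, 0 ≤ n) :
    pvAltCore (l :: ls) x =
      if x < l then (1, x + 1)
      else ((pvAltCore ls (x - l)).1 + 1, (pvAltCore ls (x - l)).2) := by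
  have hsum : 0 ≤ ls.sum := List.sum_nonneg hls
  have hlen := pvBuildPrefix_length ls 0
  have hsortedC : ((pvBuildPrefix (l :: ls) 0).1).Pairwise (· ≤ ·) :=
    pvBuildPrefix_sorted (l :: ls) 0 (by
      intro n hn
      rcases List.mem_cons.mp hn with rfl | hn
      · exact h0
      · exact hls n hn)
  have hsortedP := pvBuildPrefix_sorted ls 0 hls
  have hC : (pvBuildPrefix (l :: ls) 0).1 = l :: (pvBuildPrefix ls 0).1.map (· + l) := by
    simp only [pvBuildPrefix, zero_add]
    rw [pvBuildPrefix_fst_shift ls l]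
  have hC2 : (pvBuildPrefix (l :: ls) 0).2 = l + ls.sum := by
    simp only [pvBuildPrefix, zero_add]
    rw [pvBuildPrefix_snd]
  have hP2 : (pvBuildPrefix ls 0).2 = ls.sum := by
    rw [pvBuildPrefix_snd]; ring
  rw [hC] at hsortedC
  by_cases hx : x < l
  · rw [if_pos hx]
    simp only [pvAltCore]
    rw [hC, hC2]
    rw [if_neg (show ¬ (l :: (pvBuildPrefix ls 0).1.map (· + l) = [] ∨ l + ls.sum ≤ x) by
      simp; omega)]
    have hbis := pvBisect_eq_cnt _ x hsortedC
      ((l :: (pvBuildPrefix ls 0).1.map (· + l)).length) 0 _ (by omega) le_rfl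
      (Nat.zero_le _) (pvCnt_le _ _)
    have hcnt0 : pvCnt (l :: (pvBuildPrefix ls 0).1.map (· + l)) x = 0 := by
      simp [pvCnt, show ¬ l ≤ x by omega]
    rw [hbis, hcnt0]
    norm_num
  · rw [if_neg hx]
    by_cases ht : l + ls.sum ≤ x
    · simp only [pvAltCore]
      rw [hC, hC2, hP2]
      rw [if_pos (Or.inr ht)]
      rw [if_pos (Or.inr (show ls.sum ≤ x - l by omega))]
      simp [hlen]
    · have hne : ls ≠ [] := by
        intro e; subst e; simp at hsum ht; omega
      have hPne : (pvBuildPrefix ls 0).1 ≠ [] := by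
        intro e
        rw [e] at hlen
        exact hne (List.eq_nil_of_length_eq_zero hlen.symm)
      simp only [pvAltCore]
      rw [hC, hC2, hP2]
      rw [if_neg (show ¬ (l :: (pvBuildPrefix ls 0).1.map (· + l) = [] ∨ l + ls.sum ≤ x) by
        simp; omega)]
      rw [if_neg (show ¬ ((pvBuildPrefix ls 0).1 = [] ∨ ls.sum ≤ x - l) by
        simp [hPne]; omega)]
      have hkle := pvCnt_le (pvBuildPrefix ls 0).1 (x - l)
      have hbisC := pvBisect_eq_cnt _ x hsortedC
        ((l :: (pvBuildPrefix ls 0).1.map (· + l)).length) 0 _ (by omega) le_rfl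
        (Nat.zero_le _) (pvCnt_le _ _)
      have hbisP := pvBisect_eq_cnt _ (x - l) hsortedP
        ((pvBuildPrefix ls 0).1.length) 0 _ (by omega) le_rfl
        (Nat.zero_le _) (pvCnt_le _ _)
      have hcntC : pvCnt (l :: (pvBuildPrefix ls 0).1.map (· + l)) x
          = pvCnt (pvBuildPrefix ls 0).1 (x - l) + 1 := by
        have hpred : (fun a => decide (a ≤ x)) ∘ (· + l) = (fun a : Int => decide (a ≤ x - l)) := by
          funext a
          simp only [Function.comp_apply]
          exact decide_eq_decide.mpr (by omega)
        simp [pvCnt, show l ≤ x by omega, List.takeWhile_map, hpred]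
      rw [hbisC, hbisP, hcntC]
      cases hk : pvCnt (pvBuildPrefix ls 0).1 (x - l) with
      | zero =>
        simp
      | succ k' =>
        have hk' : k' < (pvBuildPrefix ls 0).1.length := by omega
        simp only [if_false, List.getD_cons_succ, Nat.add_sub_cancel, Nat.succ_ne_zero]
        rw [pvGetD_map_add _ _ _ hk']
        simp only [Prod.mk.injEq]
        constructor
        · push_cast; ring
        · ring

lemma pvMain (ls : List Int) (x : Int) (h : ∀ n ∈ ls, 0 ≤ n) :
    pvGoA ls 1 x = pvAltCore ls x := by
  induction ls generalizing x with
  | nil => simp [pvGoA, pvAltCore, pvBuildPrefix]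
  | cons l ls ih =>
    have h0 : 0 ≤ l := h l (by simp)
    have hls : ∀ n ∈ ls, 0 ≤ n := fun n hn => h n (by simp [hn])
    rw [pvAltCore_cons l ls x h0 hls]
    simp only [pvGoA]
    by_cases hx : x < l
    · simp [hx]
    · simp only [hx, if_false]
      rw [pvGoA_shift, ih (x - l) hls]
      simp only [Prod.mk.injEq, and_true]
      ring

-- ===== VERDICT (by name: the statement is the Claim_ definition above) =====
theorem string_index_to_line_and_column_spec : Claim_equal_string_index_to_line_and_column := by
  intro string index _
  unfold Spec_string_index_to_line_and_column string_index_to_line_and_column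
    string_index_to_line_and_column_alt
  refine pvMain _ _ ?_
  intro n hn
  simp only [List.mem_map] at hn
  obtain ⟨l, -, rfl⟩ := hn
  exact Int.natCast_nonneg _
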